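-- pv_equiv track=rewrite | github.com/ZornsLemma/ozmoo | make-acorn.py | _data_to_basic
-- ===== SOURCE A (Python) =====
-- def _data_to_basic(data):
--     basic = []
--     for i, line in enumerate(data):
--         if len(line) == 0:
--             basic.append("PRINT")
--         else:
--             s = ""
--             in_quote = False
--             for b in line:
--                 if b >= 128+32:
--                     b -= 128
--                 if b == ord('"') or b >= 128:
--                     if in_quote:
--                         s += '";'
--                         in_quote = False
--                     s += "CHR$%d" % b
--                 else:
--                     if not in_quote:
--                         s += ';"'
--                         in_quote = True
--                     s += chr(b)
--             if in_quote:
--                 s += '"'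
--             if s[0] == ";":
--                 s = s[1:]
--             if len(line) == 40 or i == len(data)-1:
--                 s += ";"
--             basic.append("PRINT" + s)
--     return "\n".join(basic)
-- ===== SOURCE B (Python) =====
-- def _data_to_basic(data):
--     def adjust(b):
--         return b - 128 if b >= 160 else b
--
--     def special(v):
--         return v == 34 or v >= 128
--
--     def pieces(norm):
--         # split norm into maximal runs of equal 'special'-ness, encode each run
--         out = []
--         i = 0
--         while i < len(norm):
--             sp = special(norm[i])
--             j = i + 1
--             while j < len(norm) and special(norm[j]) == sp:
--                 j += 1
--             seg = norm[i:j]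
--             if sp:
--                 out.append("".join("CHR$%d" % v for v in seg))
--             else:
--                 out.append('"' + "".join(chr(v) for v in seg) + '"')
--             i = j
--         return out
--
--     lines = []
--     last = len(data) - 1
--     for i, line in enumerate(data):
--         if not line:
--             lines.append("PRINT")
--             continue
--         s = ";".join(pieces([adjust(b) for b in line]))
--         if len(line) == 40 or i == last:
--             s += ";"
--         lines.append("PRINT" + s)
--     return "\n".join(lines)
-- ===== Notes on version B (the rewrite author's own statement) =====
-- stated objective: alternative
-- what changed: B replaces A's stateful in_quote character machine with a normalize-first pass that splits each line into maximal printable/special runs (index two-pointer scan), encodes each run as a whole piece and joins the pieces with ';', so the quote/semicolon bookkeeping disappears.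
import Mathlib
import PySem

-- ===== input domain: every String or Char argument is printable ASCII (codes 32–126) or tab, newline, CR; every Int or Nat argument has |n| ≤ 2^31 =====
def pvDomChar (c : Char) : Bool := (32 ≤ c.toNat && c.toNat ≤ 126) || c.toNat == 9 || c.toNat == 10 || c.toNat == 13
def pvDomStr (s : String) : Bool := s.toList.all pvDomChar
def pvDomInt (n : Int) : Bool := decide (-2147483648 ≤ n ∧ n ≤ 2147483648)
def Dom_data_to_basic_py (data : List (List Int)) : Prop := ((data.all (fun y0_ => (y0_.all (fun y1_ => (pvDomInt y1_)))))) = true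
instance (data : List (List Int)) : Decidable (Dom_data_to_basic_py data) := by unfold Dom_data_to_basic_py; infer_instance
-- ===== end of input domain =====

-- B re-encodes each line by first normalizing the bytes and then splitting them into maximal
-- printable/special runs joined with ';', replacing A's stateful in_quote character machine
-- (objective: alternative decomposition, same cost).

-- shared tiny helpers (both Pythons compute "CHR$%d" % v, chr(v) and str.join)
-- chr(v): exact for 0 ≤ v < 128, the only values reaching it inside Pre_
def pvChr (v : Int) : Char := Char.ofNat v.toNat
def pvChrPiece (v : Int) : List Char := 'C' :: 'H' :: 'R' :: '$' :: PySem.Int.toChars v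

-- ===== PORT A =====
-- the inner loop body of A, state (s, in_quote)
def dtbA_step (st : List Char × Bool) (b : Int) : List Char × Bool :=
  let b := if b ≥ 128 + 32 then b - 128 else b
  if b == 34 || b ≥ 128 then
    let s := if st.2 then st.1 ++ ['"', ';'] else st.1
    (s ++ pvChrPiece b, false)
  else
    let s := if st.2 then st.1 else st.1 ++ [';', '"']
    (s ++ [pvChr b], true)

-- one iteration of A's outer loop (i = enumerate index, n = len(data))
def dtbA_line (n : Int) (i : Int) (line : List Int) : List Char :=
  if line.length = 0 then 'P' :: 'R' :: 'I' :: 'N' :: 'T' :: []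
  else
    let st := line.foldl dtbA_step ([], false)
    let s := if st.2 then st.1 ++ ['"'] else st.1
    -- s[0] == ";" : s is nonempty here, so head? is exact
    let s := if s.head? = some ';' then s.drop 1 else s
    let s := if line.length = 40 ∨ i = n - 1 then s ++ [';'] else s
    'P' :: 'R' :: 'I' :: 'N' :: 'T' :: s

def data_to_basic_py (data : List (List Int)) : String :=
  String.ofList (PySem.Chars.join ['\n']
    ((PySem.List.enumerate data).map (fun p => dtbA_line data.length p.1 p.2)))

-- ===== PORT B =====
def dtbB_adjust (b : Int) : Int := if b ≥ 160 then b - 128 else b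

def dtbB_special (v : Int) : Bool := v == 34 || v ≥ 128

-- B's pieces(norm): peel one maximal run at a time (the Python's i/j index scan)
def dtbB_pieces : List Int → List (List Char)
  | [] => []
  | v :: vs =>
    let sp := dtbB_special v
    let seg := vs.takeWhile (fun w => dtbB_special w == sp)
    let rest := vs.dropWhile (fun w => dtbB_special w == sp)
    (if sp then (v :: seg).flatMap pvChrPiece
     else '"' :: ((v :: seg).map pvChr ++ ['"'])) :: dtbB_pieces rest
termination_by l => l.length
decreasing_by
  have := List.length_dropWhile_le (fun w => dtbB_special w == dtbB_special v) vs
  simp only [List.length_cons]; omega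

def dtbB_line (last : Int) (i : Int) (line : List Int) : List Char :=
  if line.isEmpty then 'P' :: 'R' :: 'I' :: 'N' :: 'T' :: []
  else
    let s := PySem.Chars.join [';'] (dtbB_pieces (line.map dtbB_adjust))
    let s := if line.length = 40 ∨ i = last then s ++ [';'] else s
    'P' :: 'R' :: 'I' :: 'N' :: 'T' :: s

def data_to_basic_py_alt (data : List (List Int)) : String :=
  String.ofList (PySem.Chars.join ['\n']
    ((PySem.List.enumerate data).map (fun p => dtbB_line ((data.length : Int) - 1) p.1 p.2)))

-- ===== PRECONDITION & SPEC =====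
-- Pre_ excludes exactly the inputs where Python A raises: a negative byte reaches chr() and
-- chr(negative) is a ValueError.
def Pre_data_to_basic_py (data : List (List Int)) : Prop :=
  ∀ line ∈ data, ∀ b ∈ line, 0 ≤ b
instance (data : List (List Int)) : Decidable (Pre_data_to_basic_py data) := by
  unfold Pre_data_to_basic_py; infer_instance

def pvWitness_data_to_basic_py : List (List Int) := [[72, 34, 200, 65], []]

def Spec_data_to_basic_py (data : List (List Int)) (out : String) : Prop := out = data_to_basic_py_alt data
instance (data : List (List Int)) (out : String) : Decidable (Spec_data_to_basic_py data out) := by unfold Spec_data_to_basic_py; infer_instance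

-- ===== CLAIM (what is proved, stated in full; the proofs are below) =====
def Claim_equal_data_to_basic_py : Prop := ∀ (data : List (List Int)), Dom_data_to_basic_py data → Pre_data_to_basic_py data → Spec_data_to_basic_py data (data_to_basic_py data)

-- ===== LEMMAS AND PROOFS =====

-- A's step expressed on the pre-normalized value
def dtbN_step (st : List Char × Bool) (v : Int) : List Char × Bool :=
  if dtbB_special v then
    ((if st.2 then st.1 ++ ['"', ';'] else st.1) ++ pvChrPiece v, false)
  else
    ((if st.2 then st.1 else st.1 ++ [';', '"']) ++ [pvChr v], true)

def dtbClose (st : List Char × Bool) : List Char := if st.2 then st.1 ++ ['"'] else st.1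

theorem dtbA_step_eq (st : List Char × Bool) (b : Int) :
    dtbA_step st b = dtbN_step st (dtbB_adjust b) := by
  by_cases h : b ≥ 160
  · simp [dtbA_step, dtbN_step, dtbB_adjust, dtbB_special, h, show (128:Int)+32 = 160 by norm_num]
  · simp [dtbA_step, dtbN_step, dtbB_adjust, dtbB_special, h, show (128:Int)+32 = 160 by norm_num]

theorem dtbFoldA_eq (l : List Int) (st : List Char × Bool) :
    l.foldl dtbA_step st = (l.map dtbB_adjust).foldl dtbN_step st := by
  induction l generalizing st with
  | nil => rfl
  | cons b l ih => simp [List.foldl_cons, dtbA_step_eq, ih]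

theorem dtbSpecRun (l : List Int) (h : ∀ v ∈ l, dtbB_special v = true) (s : List Char) :
    l.foldl dtbN_step (s, false) = (s ++ l.flatMap pvChrPiece, false) := by
  induction l generalizing s with
  | nil => simp
  | cons v l ih =>
    have hv := h v (by simp)
    simp [List.foldl_cons, dtbN_step, hv, ih (fun w hw => h w (List.mem_cons_of_mem _ hw))]

theorem dtbPrintRun (l : List Int) (h : ∀ v ∈ l, dtbB_special v = false) (s : List Char) :
    l.foldl dtbN_step (s, true) = (s ++ l.map pvChr, true) := by
  induction l generalizing s with
  | nil => simp
  | cons v l ih =>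
    have hv := h v (by simp)
    simp [List.foldl_cons, dtbN_step, hv, ih (fun w hw => h w (List.mem_cons_of_mem _ hw))]

theorem dtbMain (v : Int) (vs : List Int) (s : List Char) :
    dtbClose ((v :: vs).foldl dtbN_step (s, false)) =
      s ++ (if dtbB_special v then [] else [';']) ++
        PySem.Chars.join [';'] (dtbB_pieces (v :: vs)) := by
  have hseg : ∀ w ∈ vs.takeWhile (fun w => dtbB_special w == dtbB_special v),
      dtbB_special w = dtbB_special v := by
    intro w hw; simpa using List.mem_takeWhile_imp hw
  have hsplit : v :: vs =
      (v :: vs.takeWhile (fun w => dtbB_special w == dtbB_special v)) ++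
        vs.dropWhile (fun w => dtbB_special w == dtbB_special v) := by
    simp [List.takeWhile_append_dropWhile]
  have hlen := List.length_dropWhile_le (fun w => dtbB_special w == dtbB_special v) vs
  by_cases hv : dtbB_special v = true
  · -- first run is special
    have hall : ∀ w ∈ v :: vs.takeWhile (fun w => dtbB_special w == dtbB_special v),
        dtbB_special w = true := by
      intro w hw
      rcases List.mem_cons.mp hw with h | h
      · rw [h]; exact hv
      · rw [hseg w h]; exact hv
    rw [show (v :: vs).foldl dtbN_step (s, false) =
        ((v :: vs.takeWhile (fun w => dtbB_special w == dtbB_special v)) ++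
          vs.dropWhile (fun w => dtbB_special w == dtbB_special v)).foldl dtbN_step (s, false)
      from by rw [← hsplit]]
    rw [List.foldl_append, dtbSpecRun _ hall]
    rcases hrest : vs.dropWhile (fun w => dtbB_special w == dtbB_special v) with _ | ⟨r, rs⟩
    · rw [dtbB_pieces, hrest]
      simp [dtbClose, dtbB_pieces, hv, PySem.Chars.join_singleton]
    · have hr : dtbB_special r = false := by
        have hw : vs.dropWhile (fun w => dtbB_special w == dtbB_special v) ≠ [] := by
          rw [hrest]; simp
        have h1 := List.head_dropWhile_not (fun w => dtbB_special w == dtbB_special v) hw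
        have h2 : some ((vs.dropWhile (fun w => dtbB_special w == dtbB_special v)).head hw) =
            some r := by rw [← List.head?_eq_some_head hw, hrest]; rfl
        rw [Option.some.inj h2] at h1
        rw [beq_eq_false_iff_ne] at h1
        simp only [Bool.eq_false_iff] at ⊢
        intro h; exact h1 (h.trans hv.symm)
      have ih := dtbMain r rs
        (s ++ (v :: vs.takeWhile (fun w => dtbB_special w == dtbB_special v)).flatMap pvChrPiece)
      have hpieces : dtbB_pieces (v :: vs) =
          (if dtbB_special v then
            (v :: vs.takeWhile (fun w => dtbB_special w == dtbB_special v)).flatMap pvChrPiece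
           else '"' :: ((v :: vs.takeWhile (fun w => dtbB_special w == dtbB_special v)).map pvChr
             ++ ['"'])) :: dtbB_pieces (r :: rs) := by
        rw [dtbB_pieces, hrest]
      obtain ⟨q, qs, hq⟩ : ∃ q qs, dtbB_pieces (r :: rs) = q :: qs := by
        rw [dtbB_pieces]; exact ⟨_, _, rfl⟩
      rw [ih, hpieces, hq, PySem.Chars.join_cons_cons]
      simp [hv, hr, List.append_assoc]
  · -- first run is printable
    have hv' : dtbB_special v = false := by simpa using hv
    have hall : ∀ w ∈ vs.takeWhile (fun w => dtbB_special w == dtbB_special v),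
        dtbB_special w = false := by
      intro w hw; rw [hseg w hw]; exact hv'
    rw [show (v :: vs).foldl dtbN_step (s, false) =
        ((v :: vs.takeWhile (fun w => dtbB_special w == dtbB_special v)) ++
          vs.dropWhile (fun w => dtbB_special w == dtbB_special v)).foldl dtbN_step (s, false)
      from by rw [← hsplit]]
    rw [List.foldl_append, List.foldl_cons]
    rw [show dtbN_step (s, false) v =
        (s ++ [';', '"'] ++ [pvChr v], true) from by simp [dtbN_step, hv']]
    rw [dtbPrintRun _ hall]
    rcases hrest : vs.dropWhile (fun w => dtbB_special w == dtbB_special v) with _ | ⟨r, rs⟩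
    · rw [dtbB_pieces, hrest]
      simp [dtbClose, dtbB_pieces, hv', PySem.Chars.join_singleton, List.append_assoc]
    · have hr : dtbB_special r = true := by
        have hw : vs.dropWhile (fun w => dtbB_special w == dtbB_special v) ≠ [] := by
          rw [hrest]; simp
        have h1 := List.head_dropWhile_not (fun w => dtbB_special w == dtbB_special v) hw
        have h2 : some ((vs.dropWhile (fun w => dtbB_special w == dtbB_special v)).head hw) =
            some r := by rw [← List.head?_eq_some_head hw, hrest]; rfl
        rw [Option.some.inj h2] at h1
        rw [beq_eq_false_iff_ne] at h1
        cases h : dtbB_special r with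
        | false => exact absurd (h.trans hv'.symm) h1
        | true => rfl
      rw [show (r :: rs).foldl dtbN_step
            (s ++ [';', '"'] ++ [pvChr v] ++
              (vs.takeWhile (fun w => dtbB_special w == dtbB_special v)).map pvChr, true) =
          (r :: rs).foldl dtbN_step
            (s ++ [';', '"'] ++ [pvChr v] ++
              (vs.takeWhile (fun w => dtbB_special w == dtbB_special v)).map pvChr ++ ['"', ';'], false)
        from by
          rw [List.foldl_cons, List.foldl_cons]
          simp [dtbN_step, hr, List.append_assoc]]
      have ih := dtbMain r rs
        (s ++ [';', '"'] ++ [pvChr v] ++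
          (vs.takeWhile (fun w => dtbB_special w == dtbB_special v)).map pvChr ++ ['"', ';'])
      have hpieces : dtbB_pieces (v :: vs) =
          (if dtbB_special v then
            (v :: vs.takeWhile (fun w => dtbB_special w == dtbB_special v)).flatMap pvChrPiece
           else '"' :: ((v :: vs.takeWhile (fun w => dtbB_special w == dtbB_special v)).map pvChr
             ++ ['"'])) :: dtbB_pieces (r :: rs) := by
        rw [dtbB_pieces, hrest]
      obtain ⟨q, qs, hq⟩ : ∃ q qs, dtbB_pieces (r :: rs) = q :: qs := by
        rw [dtbB_pieces]; exact ⟨_, _, rfl⟩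
      rw [ih, hpieces, hq, PySem.Chars.join_cons_cons]
      simp [hv', hr, List.append_assoc]
termination_by vs.length
decreasing_by all_goals
  (have := congrArg List.length hrest
   simp only [List.length_cons] at this
   omega)

theorem dtbJoin_head (x : List Char) (xs : List (List Char)) :
    ∃ t, PySem.Chars.join [';'] (x :: xs) = x ++ t := by
  cases xs with
  | nil => exact ⟨[], by rw [PySem.Chars.join_singleton]; simp⟩
  | cons y ys =>
    exact ⟨[';'] ++ PySem.Chars.join [';'] (y :: ys), by
      rw [PySem.Chars.join_cons_cons]; simp⟩

theorem dtbStrip (v : Int) (vs : List Int) :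
    (if (dtbClose ((v :: vs).foldl dtbN_step ([], false))).head? = some ';'
     then (dtbClose ((v :: vs).foldl dtbN_step ([], false))).drop 1
     else dtbClose ((v :: vs).foldl dtbN_step ([], false))) =
      PySem.Chars.join [';'] (dtbB_pieces (v :: vs)) := by
  have hmain := dtbMain v vs []
  rw [hmain]
  by_cases hv : dtbB_special v = true
  · have hpieces : dtbB_pieces (v :: vs) =
        ((v :: vs.takeWhile (fun w => dtbB_special w == dtbB_special v)).flatMap pvChrPiece) ::
          dtbB_pieces (vs.dropWhile (fun w => dtbB_special w == dtbB_special v)) := by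
      rw [dtbB_pieces]; simp [hv]
    obtain ⟨t, ht⟩ := dtbJoin_head
      ((v :: vs.takeWhile (fun w => dtbB_special w == dtbB_special v)).flatMap pvChrPiece)
      (dtbB_pieces (vs.dropWhile (fun w => dtbB_special w == dtbB_special v)))
    rw [hpieces, ht]
    simp [hv, pvChrPiece]
  · simp [hv]

theorem dtbLine_eq (n i : Int) (line : List Int) :
    dtbA_line n i line = dtbB_line (n - 1) i line := by
  cases line with
  | nil => rfl
  | cons b bs =>
    have hstrip := dtbStrip (dtbB_adjust b) (bs.map dtbB_adjust)
    unfold dtbA_line dtbB_line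
    simp only [List.length_cons, List.isEmpty_cons, dtbFoldA_eq, List.map_cons, dtbClose] at hstrip ⊢
    rw [hstrip]
    simp

theorem data_to_basic_py_spec : Claim_equal_data_to_basic_py := by
  intro data _ _
  unfold Spec_data_to_basic_py data_to_basic_py data_to_basic_py_alt
  congr 1
  exact congrArg _ (List.map_congr_left (fun p _ => dtbLine_eq data.length p.1 p.2))
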